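-- pv_equiv track=rewrite | github.com/thierryxdp/TCC | problems/807/solution_231586.py | conta_frases
-- ===== SOURCE A (Python) =====
-- def conta_frases(x):
--
--     contador = 0
--     for i, termo in enumerate(x):
--         if termo in ('!', '?'):
--             contador += 1
--
--         elif termo == '.':
--
--           if x[i+1] == ' ':
--             contador += 1
--
--           elif x[i+1] == '.':
--             contador += 1
--
--     return contador
-- ===== SOURCE B (Python) =====
-- def conta_frases(x):
--     total = sum(c in '!?' for c in x)
--     for a, b in zip(x, x[1:]):
--         if a == '.' and b in (' ', '.'):
--             total += 1
--     return total
-- ===== Notes on version B (the rewrite author's own statement) =====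
-- stated objective: simpler
-- what changed: A's single fused loop with index arithmetic (enumerate plus x[i+1] lookups) is replaced by a pass counting '!'/'?' plus a separate pass over adjacent character pairs from zip(x, x[1:]), with no indexing at all.
-- crash fix: On strings ending with '.', A raises IndexError reading x[i+1] past the end; B returns the sentence count ignoring the trailing dot. — e.g. on conta_frases("Fim."): A raises IndexError, B returns 0
import Mathlib
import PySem

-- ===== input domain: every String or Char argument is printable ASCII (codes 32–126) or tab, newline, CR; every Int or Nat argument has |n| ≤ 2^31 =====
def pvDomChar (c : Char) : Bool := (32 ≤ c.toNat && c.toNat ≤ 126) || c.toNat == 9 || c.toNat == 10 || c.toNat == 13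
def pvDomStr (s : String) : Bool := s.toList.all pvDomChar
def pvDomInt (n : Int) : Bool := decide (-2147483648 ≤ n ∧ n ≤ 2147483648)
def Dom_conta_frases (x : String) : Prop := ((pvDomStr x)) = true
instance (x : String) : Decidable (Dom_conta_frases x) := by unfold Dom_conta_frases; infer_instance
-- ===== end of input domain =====

-- B replaces A's single fused index-lookup loop by a pass counting '!'/'?' plus a pass over
-- adjacent character pairs (zip), removing all index arithmetic (objective: simpler).

-- ===== PORT A =====
def conta_frases (x : String) : Int :=
  (PySem.List.enumerate x.toList).foldl
    (fun contador p =>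
      if p.2 = '!' ∨ p.2 = '?' then contador + 1
      else if p.2 = '.' then
        -- x[i+1]: pyGet? is none exactly where Python raises IndexError (excluded by Pre_)
        if PySem.List.pyGet? x.toList (p.1 + 1) = some ' ' then contador + 1
        else if PySem.List.pyGet? x.toList (p.1 + 1) = some '.' then contador + 1
        else contador
      else contador) 0

-- ===== PORT B =====
def conta_frases_alt (x : String) : Int :=
  let total : Int := (x.toList.map (fun c => if c = '!' ∨ c = '?' then (1 : Int) else 0)).sum
  (x.toList.zip (PySem.List.slice x.toList (some 1) none)).foldl
    (fun total p => if p.1 = '.' ∧ (p.2 = ' ' ∨ p.2 = '.') then total + 1 else total) total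

-- ===== PRECONDITION & SPEC =====
-- A reads x[i+1] at every '.', so it raises IndexError exactly when x ends with '.'; Pre_ excludes those inputs.
def Pre_conta_frases (x : String) : Prop := x.toList.getLast? ≠ some '.'
instance (x : String) : Decidable (Pre_conta_frases x) := by unfold Pre_conta_frases; infer_instance
def pvWitness_conta_frases : String := "Oi! Tudo bem? Sim.. "

-- On strings ending in '.', A raises IndexError while B returns the count ignoring the trailing dot.
def Raises_conta_frases (x : String) : Prop := x.toList.getLast? = some '.'
instance (x : String) : Decidable (Raises_conta_frases x) := by unfold Raises_conta_frases; infer_instance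
def pvRaiseWitness_conta_frases : String := "Fim."
def pvRaiseWitnessOut_conta_frases : Int := 0

def Spec_conta_frases (x : String) (out : Int) : Prop := out = conta_frases_alt x
instance (x : String) (out : Int) : Decidable (Spec_conta_frases x out) := by unfold Spec_conta_frases; infer_instance

-- ===== CLAIM (what is proved, stated in full; the proofs are below) =====
def Claim_equal_conta_frases : Prop := ∀ (x : String), Dom_conta_frases x → Pre_conta_frases x → Spec_conta_frases x (conta_frases x)
def Claim_raises_conta_frases : Prop := (∀ (x : String), Dom_conta_frases x → Raises_conta_frases x → ¬ Pre_conta_frases x) ∧ (Dom_conta_frases (pvRaiseWitness_conta_frases) ∧ Raises_conta_frases (pvRaiseWitness_conta_frases) ∧ conta_frases_alt (pvRaiseWitness_conta_frases) = pvRaiseWitnessOut_conta_frases)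

-- ===== LEMMAS AND PROOFS =====

-- g l: what both programs compute on the character list l, by recursion on adjacent pairs
-- (a lone final '.' contributes 0, matching the none-branch of port A and the empty zip tail of B).
def pvG : List Char → Int
  | [] => 0
  | [c] => if c = '!' ∨ c = '?' then 1 else 0
  | a :: b :: r =>
      (if a = '!' ∨ a = '?' then 1
       else if a = '.' ∧ (b = ' ' ∨ b = '.') then 1 else 0) + pvG (b :: r)

-- A's loop over enumerate, with lookups into the full list, computes pvG of the remaining suffix.
theorem pvA_loop (full : List Char) :
    ∀ (l : List Char) (k : Nat) (acc : Int), full.drop k = l →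
    (PySem.List.enumerate l (k : Int)).foldl
      (fun contador p =>
        if p.2 = '!' ∨ p.2 = '?' then contador + 1
        else if p.2 = '.' then
          if PySem.List.pyGet? full (p.1 + 1) = some ' ' then contador + 1
          else if PySem.List.pyGet? full (p.1 + 1) = some '.' then contador + 1
          else contador
        else contador) acc = acc + pvG l := by
  intro l
  induction l with
  | nil => intro k acc h; simp [PySem.List.enumerate, pvG]
  | cons a t ih =>
    intro k acc h
    have hdrop : full.drop (k + 1) = t := by
      have := congrArg List.tail h
      simpa [List.tail_drop] using this
    have hget : PySem.List.pyGet? full ((k : Int) + 1) = t[0]? := by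
      have h1 : ((k : Int) + 1) = ((k + 1 : Nat) : Int) := by push_cast; ring
      rw [h1, PySem.List.pyGet?_natCast]
      have h2 := (@List.getElem?_drop Char full (k + 1) 0).symm
      simpa [hdrop] using h2
    rw [PySem.List.enumerate_cons]
    cases t with
    | nil =>
      simp only [List.foldl_cons, PySem.List.enumerate, List.foldl_nil, hget, List.getElem?_nil,
        pvG, reduceCtorEq, if_false]
      split_ifs <;> omega
    | cons b r =>
      simp only [List.foldl_cons]
      have ih' := ih (k + 1) (if a = '!' ∨ a = '?' then acc + 1
        else if a = '.' then
          if PySem.List.pyGet? full ((k : Int) + 1) = some ' ' then acc + 1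
          else if PySem.List.pyGet? full ((k : Int) + 1) = some '.' then acc + 1 else acc
        else acc) hdrop
      rw [Nat.cast_add, Nat.cast_one] at ih'
      rw [ih']
      simp only [hget, List.getElem?_cons_zero, Option.some.injEq, pvG]
      clear ih ih' h hget hdrop
      split_ifs <;> first | linarith | simp_all

-- B's pair loop (over zip with the tail) adds the pair count of pvG.
theorem pvB_zip : ∀ (l : List Char) (t0 : Int),
    (l.zip l.tail).foldl
      (fun total p => if p.1 = '.' ∧ (p.2 = ' ' ∨ p.2 = '.') then total + 1 else total) t0
    = t0 + (pvG l - (l.map (fun c => if c = '!' ∨ c = '?' then (1 : Int) else 0)).sum) := by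
  intro l
  induction l with
  | nil => intro t0; simp [pvG]
  | cons a t ih =>
    intro t0
    cases t with
    | nil => simp [pvG]
    | cons b r =>
      simp only [List.tail_cons, List.zip_cons_cons, List.foldl_cons]
      simp only [List.tail_cons] at ih
      rw [ih]
      simp only [pvG, List.map_cons, List.sum_cons]
      clear ih
      split_ifs <;> first | linarith | simp_all

theorem conta_frases_eq_alt (x : String) : conta_frases x = conta_frases_alt x := by
  unfold conta_frases conta_frases_alt
  rw [PySem.List.slice_from_one]
  have hA := pvA_loop x.toList x.toList 0 0 (by simp)
  have hB := pvB_zip x.toList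
    ((x.toList.map (fun c => if c = '!' ∨ c = '?' then (1 : Int) else 0)).sum)
  simp only [Nat.cast_zero] at hA
  rw [hA, hB]
  ring

-- ===== VERDICT (by name: the statement is the Claim_ definition above) =====
theorem conta_frases_spec : Claim_equal_conta_frases := by
  intro x _ _
  unfold Spec_conta_frases
  exact conta_frases_eq_alt x

theorem conta_frases_raises : Claim_raises_conta_frases := by
  unfold Claim_raises_conta_frases
  exact ⟨fun x _ hr hp => hp hr, by decide⟩

-- self-check: the raise-witness facts of conta_frases_raises, projected out
theorem conta_frases_raises_ok : Dom_conta_frases pvRaiseWitness_conta_frases ∧ Raises_conta_frases pvRaiseWitness_conta_frases ∧ conta_frases_alt pvRaiseWitness_conta_frases = pvRaiseWitnessOut_conta_frases := conta_frases_raises.2
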